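-- pv_equiv track=rewrite | github.com/BCJonkhout/msc-thesis-code | src/pilot/architectures/graphrag.py | _entity_to_community
-- ===== SOURCE A (Python) =====
-- from collections import defaultdict
--
-- def _entity_to_community(
--     communities: list[set[str]],
-- ) -> dict[str, list[int]]:
--     """Reverse map: entity name → list of community indices it belongs to."""
--     out: dict[str, list[int]] = defaultdict(list)
--     for c_idx, members in enumerate(communities):
--         for name in members:
--             out[name].append(c_idx)
--     return dict(out)
-- ===== SOURCE B (Python) =====
-- def _entity_to_community(
--     communities: list[set[str]],
-- ) -> dict[str, list[int]]:
--     """Reverse map: entity name -> list of community indices it belongs to."""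
--     names = dict.fromkeys(n for c in communities for n in c)
--     return {n: [i for i, c in enumerate(communities) if n in c] for n in names}
-- ===== Notes on version B (the rewrite author's own statement) =====
-- stated objective: idiomatic
-- what changed: Instead of one populating pass appending indices into a defaultdict, B first collects the distinct entity names and then builds each index list by an enumerate+membership comprehension over the communities.
import Mathlib
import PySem

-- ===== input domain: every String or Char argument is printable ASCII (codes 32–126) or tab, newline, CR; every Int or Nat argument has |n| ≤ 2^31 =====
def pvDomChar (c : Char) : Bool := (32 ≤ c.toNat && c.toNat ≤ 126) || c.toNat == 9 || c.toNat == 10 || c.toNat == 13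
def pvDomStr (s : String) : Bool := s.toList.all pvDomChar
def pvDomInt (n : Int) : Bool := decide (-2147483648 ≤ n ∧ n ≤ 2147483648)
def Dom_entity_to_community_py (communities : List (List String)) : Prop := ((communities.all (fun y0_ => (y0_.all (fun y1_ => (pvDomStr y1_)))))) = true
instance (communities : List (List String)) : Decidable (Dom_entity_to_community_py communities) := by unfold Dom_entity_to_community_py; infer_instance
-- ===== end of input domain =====

-- B builds the distinct-name list first and then each index list by an enumerate+membership
-- scan, instead of A's single appending pass into a defaultdict; same result, idiomatic dict comprehension.

-- ===== PORT A =====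
def entity_to_community_py (communities : List (List String)) : List (String × List Int) :=
  ((PySem.List.enumerate communities).foldl
    (fun out p => p.2.foldl (fun out name => out.modify name [] (fun v => v ++ [p.1])) out)
    PySem.Dict.empty).items

-- ===== PORT B =====
def entity_to_community_py_alt (communities : List (List String)) : List (String × List Int) :=
  (PySem.List.dedup communities.flatten).map (fun n =>
    (n, ((PySem.List.enumerate communities).filter (fun p => decide (n ∈ p.2))).map (fun p => p.1)))

-- ===== PRECONDITION & SPEC =====
-- Each community is a Python set, so its model list holds distinct elements; Pre_ states exactly
-- that (a list with a duplicated member inside one community corresponds to no Python input).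
def Pre_entity_to_community_py (communities : List (List String)) : Prop :=
  ∀ c ∈ communities, c.Nodup
instance (communities : List (List String)) : Decidable (Pre_entity_to_community_py communities) := by unfold Pre_entity_to_community_py; infer_instance
def pvWitness_entity_to_community_py : List (List String) := [["a", "b"], ["b"], [], ["c", "a"]]

def Spec_entity_to_community_py (communities : List (List String)) (out : List (String × List Int)) : Prop := out = entity_to_community_py_alt communities
instance (communities : List (List String)) (out : List (String × List Int)) : Decidable (Spec_entity_to_community_py communities out) := by unfold Spec_entity_to_community_py; infer_instance

-- ===== CLAIM (what is proved, stated in full; the proofs are below) =====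
def Claim_equal_entity_to_community_py : Prop := ∀ (communities : List (List String)), Dom_entity_to_community_py communities → Pre_entity_to_community_py communities → Spec_entity_to_community_py communities (entity_to_community_py communities)

-- ===== LEMMAS AND PROOFS =====

-- A's nested loop is the flat loop over all (name, index) pairs.
lemma etc_flatfold (xs : List (Int × List String)) (d : PySem.Dict String (List Int)) :
    xs.foldl (fun out p => p.2.foldl (fun out name => out.modify name [] (fun v => v ++ [p.1])) out) d
    = (xs.flatMap (fun p => p.2.map (fun n => (n, p.1)))).foldl
        (fun d q => d.modify q.1 [] (fun v => v ++ [q.2])) d := by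
  induction xs generalizing d with
  | nil => rfl
  | cons hd tl ih =>
    simp only [List.foldl_cons, List.flatMap_cons, List.foldl_append, List.foldl_map]
    exact ih _

-- with no duplicates, filtering a community for one name yields it once iff present
lemma etc_filter_nodup (c : List String) (n : String) (h : c.Nodup) :
    c.filter (fun m => m == n) = if n ∈ c then [n] else [] := by
  induction c with
  | nil => simp
  | cons hd tl ih =>
    rcases List.nodup_cons.mp h with ⟨hhd, htl⟩
    by_cases he : hd = n
    · subst he
      simp [hhd]
      intro a ha hb
      exact hhd (hb ▸ ha)
    · simp only [List.filter_cons, beq_iff_eq, he, ih htl, List.mem_cons]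
      simp [Ne.symm he]

-- the index list A accumulates for n equals B's filtered enumerate scan
lemma etc_values (xs : List (Int × List String)) (n : String) (h : ∀ p ∈ xs, p.2.Nodup) :
    ((xs.flatMap (fun p => p.2.map (fun m => (m, p.1)))).filter (fun q => q.1 == n)).map (fun q => q.2)
    = (xs.filter (fun p => decide (n ∈ p.2))).map (fun p => p.1) := by
  induction xs with
  | nil => rfl
  | cons hd tl ih =>
    have hn : hd.2.Nodup := h hd (List.mem_cons_self ..)
    simp only [List.flatMap_cons, List.filter_append, List.map_append, List.filter_map,
      List.filter_cons]
    rw [ih (fun p hp => h p (List.mem_cons_of_mem _ hp))]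
    have : hd.2.filter ((fun q => q.1 == n) ∘ (fun m => (m, hd.1))) = hd.2.filter (fun m => m == n) := rfl
    rw [this, etc_filter_nodup _ _ hn]
    by_cases hm : n ∈ hd.2 <;> simp [hm]

lemma etc_map_fst (xs : List (Int × List String)) :
    (xs.flatMap (fun p => p.2.map (fun n => (n, p.1)))).map Prod.fst = (xs.map (fun p => p.2)).flatten := by
  induction xs with
  | nil => rfl
  | cons hd tl ih => simp [List.flatMap_cons, ih, List.map_map, Function.comp_def]

-- ===== VERDICT (by name: the statement is the Claim_ definition above) =====
theorem entity_to_community_py_spec : Claim_equal_entity_to_community_py := by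
  intro cs _ hpre
  unfold Spec_entity_to_community_py entity_to_community_py entity_to_community_py_alt
  rw [etc_flatfold]
  set l := (PySem.List.enumerate cs).flatMap (fun p => p.2.map (fun n => (n, p.1))) with hl
  have hnodup : ((l.foldl (fun d q => d.modify q.1 [] (fun v => v ++ [q.2])) PySem.Dict.empty)).keys.Nodup :=
    PySem.Dict.nodup_keys_foldl_modify_key l Prod.fst [] (fun d q => fun v => v ++ [q.2]) _ PySem.Dict.nodup_keys_empty
  rw [PySem.Dict.items_eq_map_keys _ hnodup []]
  have hkeys : ((l.foldl (fun d q => d.modify q.1 [] (fun v => v ++ [q.2])) PySem.Dict.empty)).keys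
      = PySem.List.dedup cs.flatten := by
    rw [PySem.Dict.keys_foldl_modify_key, PySem.Dict.keys_empty, PySem.Set.update_nil_left]
    rw [hl, etc_map_fst, PySem.List.map_snd_enumerate, PySem.List.dedup_eq_ofList]
  rw [hkeys]
  apply List.map_congr_left
  intro n _
  have hval : ((l.foldl (fun d q => d.modify q.1 [] (fun v => v ++ [q.2])) PySem.Dict.empty)).getD n []
      = ((PySem.List.enumerate cs).filter (fun p => decide (n ∈ p.2))).map (fun p => p.1) := by
    rw [PySem.Dict.getD_foldl_modify_append, PySem.Dict.getD_empty, List.nil_append, hl]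
    apply etc_values
    intro p hp
    rcases (PySem.List.mem_enumerate_iff _ _ _).mp hp with ⟨k, hk, rfl⟩
    exact hpre _ (List.getElem_mem hk)
  rw [hval]
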